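-- pv_equiv track=rewrite | github.com/TristaCao/SpecificQ_Classifier | feature_extrac.py | polarity
-- ===== SOURCE A (Python) =====
-- def match_liwc(w, liwc_dict, liwc_prefix):
--     w = w.lower()
--     if w in liwc_dict:
--         return liwc_dict[w]
--     if w[0] in liwc_prefix:
--         for prefix, cats in liwc_prefix[w[0]]:
--             if w.startswith(prefix):
--                 return cats
--     return set()
--
-- def polarity(q_tokens, liwc_dict, liwc_prefix):
--     # doing for only insight, Discrepancy, Certainty
--     insight_ct = 0
--     discrep_ct = 0
--     certain_ct = 0
--     cause_ct = 0
--     tentat_ct = 0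
--     differ_ct = 0
--     for token in q_tokens:
--         cat = match_liwc(token, liwc_dict, liwc_prefix)
--         if cat != set():
--             if 'insight' in cat:
--                 insight_ct += 1
--             if 'discrep' in cat:
--                 discrep_ct += 1
--             if 'certain' in cat:
--                 certain_ct += 1
--             if 'cause' in cat:
--                 cause_ct += 1
--             if 'tentat' in cat:
--                 tentat_ct += 1
--             if 'differ' in cat:
--                 differ_ct += 1
--     return insight_ct, discrep_ct, certain_ct, cause_ct, tentat_ct, differ_ct
-- ===== SOURCE B (Python) =====
-- def match_liwc(w, liwc_dict, liwc_prefix):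
--     w = w.lower()
--     if w in liwc_dict:
--         return liwc_dict[w]
--     if w[0] in liwc_prefix:
--         for prefix, cats in liwc_prefix[w[0]]:
--             if w.startswith(prefix):
--                 return cats
--     return set()
--
-- def polarity(q_tokens, liwc_dict, liwc_prefix):
--     # staged dedupe-and-weight: match_liwc runs once per DISTINCT token, its
--     # result weighted by the token's multiplicity, then six weighted sums.
--     freq = {}
--     for t in q_tokens:
--         freq[t] = freq.get(t, 0) + 1
--     weighted = [(match_liwc(tok, liwc_dict, liwc_prefix), n)
--                 for tok, n in freq.items()]
--     def total(c):
--         return sum(n for cat, n in weighted if c in cat)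
--     return (total('insight'), total('discrep'), total('certain'),
--             total('cause'), total('tentat'), total('differ'))
-- ===== Notes on version B (the rewrite author's own statement) =====
-- stated objective: alternative
-- what changed: replaces A's single scan that runs match_liwc on every token and branches into six counters by a staged dedupe-and-weight pipeline: a token-frequency dict built first, then one (category-set, multiplicity) pair per DISTINCT token (match_liwc runs once per distinct token instead of once per token), then six weighted sums over those pairs
import Mathlib
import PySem

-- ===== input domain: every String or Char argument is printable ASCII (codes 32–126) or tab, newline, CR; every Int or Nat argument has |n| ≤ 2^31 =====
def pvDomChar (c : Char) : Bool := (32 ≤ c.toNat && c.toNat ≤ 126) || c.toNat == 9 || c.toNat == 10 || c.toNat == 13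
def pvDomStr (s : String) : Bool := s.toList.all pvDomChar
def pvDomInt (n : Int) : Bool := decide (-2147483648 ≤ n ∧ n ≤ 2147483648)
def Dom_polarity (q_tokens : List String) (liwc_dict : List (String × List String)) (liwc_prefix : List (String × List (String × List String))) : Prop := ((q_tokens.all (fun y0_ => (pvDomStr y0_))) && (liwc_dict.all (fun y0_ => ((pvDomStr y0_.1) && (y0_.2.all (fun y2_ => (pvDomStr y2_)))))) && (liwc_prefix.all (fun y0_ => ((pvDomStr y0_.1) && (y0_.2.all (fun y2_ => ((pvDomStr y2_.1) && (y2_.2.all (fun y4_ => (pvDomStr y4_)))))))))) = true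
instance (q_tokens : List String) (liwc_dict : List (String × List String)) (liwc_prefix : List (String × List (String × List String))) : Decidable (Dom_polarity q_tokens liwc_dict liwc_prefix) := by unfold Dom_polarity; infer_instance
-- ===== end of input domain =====

-- B replaces A's single scan (match_liwc once per token, six branch counters) by a staged
-- dedupe-and-weight pipeline: a token-frequency dict, one weighted (categories, multiplicity)
-- pair per DISTINCT token, then six weighted sums (objective: alternative; equal value proved).

-- ===== PORT A =====
-- shared helper: match_liwc (identical source in Source A and Source B); none = IndexError on w[0]
-- of an empty token;  Python's fallback `set()` is ported as the empty list [].
def firstPrefixMatch (wl : String) : List (String × List String) → List String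
  | [] => []
  | (p, cats) :: rest =>
    if PySem.Str.startswith wl p then cats else firstPrefixMatch wl rest

def match_liwc (w : String) (liwc_dict : List (String × List String)) (liwc_prefix : List (String × List (String × List String))) : Option (List String) :=
  let wl := PySem.Str.lower w
  match (PySem.Dict.ofList liwc_dict).get? wl with
  | some cats => some cats
  | none =>
    match PySem.Str.pyGet? wl 0 with
    | none => none            -- IndexError: w[0] of ""
    | some c =>
      match (PySem.Dict.ofList liwc_prefix).get? (String.ofList [c]) with
      | some pairs => some (firstPrefixMatch wl pairs)
      | none => some []

-- A's loop over the six counters.  Python's guard is `cat != set()`, which also passes for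
-- an empty LIST value; since membership in an empty list is false the six counters are
-- unchanged either way, so `cat ≠ []` computes the same state.
def polarityLoopA (liwc_dict : List (String × List String)) (liwc_prefix : List (String × List (String × List String))) : List String → (Int × Int × Int × Int × Int × Int) → Option (Int × Int × Int × Int × Int × Int)
  | [], acc => some acc
  | token :: rest, (i, ds, ce, ca, te, df) =>
    match match_liwc token liwc_dict liwc_prefix with
    | none => none
    | some cat =>
      if cat ≠ [] then
        polarityLoopA liwc_dict liwc_prefix rest
          ((if "insight" ∈ cat then i + 1 else i),
           (if "discrep" ∈ cat then ds + 1 else ds),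
           (if "certain" ∈ cat then ce + 1 else ce),
           (if "cause" ∈ cat then ca + 1 else ca),
           (if "tentat" ∈ cat then te + 1 else te),
           (if "differ" ∈ cat then df + 1 else df))
      else
        polarityLoopA liwc_dict liwc_prefix rest (i, ds, ce, ca, te, df)

def polarity (q_tokens : List String) (liwc_dict : List (String × List String)) (liwc_prefix : List (String × List (String × List String))) : Int × Int × Int × Int × Int × Int :=
  (polarityLoopA liwc_dict liwc_prefix q_tokens (0, 0, 0, 0, 0, 0)).getD (0, 0, 0, 0, 0, 0)

-- ===== PORT B =====
-- the comprehension [(match_liwc(tok,…), n) for tok, n in freq.items()]; none = it raises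
def weightedCats (liwc_dict : List (String × List String)) (liwc_prefix : List (String × List (String × List String))) : List (String × Int) → Option (List (List String × Int))
  | [] => some []
  | (tok, n) :: rest =>
    match match_liwc tok liwc_dict liwc_prefix with
    | none => none
    | some cat =>
      match weightedCats liwc_dict liwc_prefix rest with
      | none => none
      | some ws => some ((cat, n) :: ws)

-- total(c) = sum(n for cat, n in weighted if c in cat)
def totalB (c : String) (ws : List (List String × Int)) : Int :=
  ((ws.filter (fun p => decide (c ∈ p.1))).map (·.2)).sum

def polarity_alt (q_tokens : List String) (liwc_dict : List (String × List String)) (liwc_prefix : List (String × List (String × List String))) : Int × Int × Int × Int × Int × Int :=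
  let freq := q_tokens.foldl (fun d t => d.insert t (d.getD t 0 + 1)) PySem.Dict.empty
  match weightedCats liwc_dict liwc_prefix freq.items with
  | none => (0, 0, 0, 0, 0, 0)   -- unreachable under Pre_ (IndexError in Python)
  | some ws =>
    (totalB "insight" ws, totalB "discrep" ws, totalB "certain" ws,
     totalB "cause" ws, totalB "tentat" ws, totalB "differ" ws)

-- ===== PRECONDITION & SPEC =====
-- Pre_ excludes exactly the inputs on which Python's match_liwc evaluates w[0] of an empty
-- token and raises IndexError: an empty token is admitted only when "" is a key of liwc_dict.
def Pre_polarity (q_tokens : List String) (liwc_dict : List (String × List String)) (liwc_prefix : List (String × List (String × List String))) : Prop :=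
  ∀ t ∈ q_tokens, t = "" → "" ∈ liwc_dict.map Prod.fst
instance (q_tokens : List String) (liwc_dict : List (String × List String)) (liwc_prefix : List (String × List (String × List String))) : Decidable (Pre_polarity q_tokens liwc_dict liwc_prefix) := by unfold Pre_polarity; infer_instance

def pvWitness_polarity : List String × (List (String × List String)) × (List (String × List (String × List String))) :=
  (["Know", "maybe"], [("know", ["insight", "cause"])], [("m", [("may", ["tentat"])])])

def Spec_polarity (q_tokens : List String) (liwc_dict : List (String × List String)) (liwc_prefix : List (String × List (String × List String))) (out : Int × Int × Int × Int × Int × Int) : Prop := out = polarity_alt q_tokens liwc_dict liwc_prefix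
instance (q_tokens : List String) (liwc_dict : List (String × List String)) (liwc_prefix : List (String × List (String × List String))) (out : Int × Int × Int × Int × Int × Int) : Decidable (Spec_polarity q_tokens liwc_dict liwc_prefix out) := by unfold Spec_polarity; infer_instance

-- ===== CLAIM (what is proved, stated in full; the proofs are below) =====
def Claim_equal_polarity : Prop := ∀ (q_tokens : List String) (liwc_dict : List (String × List String)) (liwc_prefix : List (String × List (String × List String))), Dom_polarity q_tokens liwc_dict liwc_prefix → Pre_polarity q_tokens liwc_dict liwc_prefix → Spec_polarity q_tokens liwc_dict liwc_prefix (polarity q_tokens liwc_dict liwc_prefix)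

-- ===== LEMMAS AND PROOFS =====

-- the category list of a token once match_liwc is known to succeed
def catOf (liwc_dict : List (String × List String)) (liwc_prefix : List (String × List (String × List String))) (t : String) : List String :=
  (match_liwc t liwc_dict liwc_prefix).getD []

def cnt (liwc_dict : List (String × List String)) (liwc_prefix : List (String × List (String × List String))) (c : String) (ts : List String) : Int :=
  (ts.countP (fun t => decide (c ∈ catOf liwc_dict liwc_prefix t)) : Int)

theorem loopA_success (liwc_dict : List (String × List String)) (liwc_prefix : List (String × List (String × List String))) (ts : List String)
    (h : ∀ t ∈ ts, (match_liwc t liwc_dict liwc_prefix).isSome) (i ds ce ca te df : Int) :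
    polarityLoopA liwc_dict liwc_prefix ts (i, ds, ce, ca, te, df)
      = some (i + cnt liwc_dict liwc_prefix "insight" ts, ds + cnt liwc_dict liwc_prefix "discrep" ts,
              ce + cnt liwc_dict liwc_prefix "certain" ts, ca + cnt liwc_dict liwc_prefix "cause" ts,
              te + cnt liwc_dict liwc_prefix "tentat" ts, df + cnt liwc_dict liwc_prefix "differ" ts) := by
  induction ts generalizing i ds ce ca te df with
  | nil => simp [polarityLoopA, cnt]
  | cons t rest ih =>
    have ht := h t (by simp)
    obtain ⟨cat, hcat⟩ := Option.isSome_iff_exists.mp ht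
    have hrest : ∀ t ∈ rest, (match_liwc t liwc_dict liwc_prefix).isSome :=
      fun x hx => h x (by simp [hx])
    have hco : catOf liwc_dict liwc_prefix t = cat := by simp [catOf, hcat]
    simp only [polarityLoopA, hcat]
    have hcnt : ∀ c : String, cnt liwc_dict liwc_prefix c (t :: rest)
        = (if c ∈ cat then 1 else 0) + cnt liwc_dict liwc_prefix c rest := by
      intro c
      simp only [cnt, List.countP_cons, hco]
      by_cases hc : c ∈ cat <;> simp [hc] <;> omega
    by_cases hnil : cat = []
    · subst hnil
      rw [if_neg (by simp), ih hrest]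
      simp [hcnt]
    · rw [if_pos hnil, ih hrest]
      simp only [hcnt, Option.some.injEq, Prod.mk.injEq]
      refine ⟨?_, ?_, ?_, ?_, ?_, ?_⟩ <;> split_ifs <;> omega

theorem loopA_failure (liwc_dict : List (String × List String)) (liwc_prefix : List (String × List (String × List String))) (ts : List String)
    (h : ∃ t ∈ ts, match_liwc t liwc_dict liwc_prefix = none) (acc : Int × Int × Int × Int × Int × Int) :
    polarityLoopA liwc_dict liwc_prefix ts acc = none := by
  induction ts generalizing acc with
  | nil => simp at h
  | cons t rest ih =>
    obtain ⟨acc1, acc2, acc3, acc4, acc5, acc6⟩ := acc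
    obtain ⟨x, hx, hnone⟩ := h
    rcases List.mem_cons.mp hx with h1 | h1
    · subst h1; simp [polarityLoopA, hnone]
    · cases hm : match_liwc t liwc_dict liwc_prefix with
      | none => simp [polarityLoopA, hm]
      | some cat =>
        simp only [polarityLoopA, hm]
        split <;> exact ih ⟨x, h1, hnone⟩ _

theorem weightedCats_success (liwc_dict : List (String × List String)) (liwc_prefix : List (String × List (String × List String))) (l : List (String × Int))
    (h : ∀ p ∈ l, (match_liwc p.1 liwc_dict liwc_prefix).isSome) :
    weightedCats liwc_dict liwc_prefix l
      = some (l.map (fun p => (catOf liwc_dict liwc_prefix p.1, p.2))) := by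
  induction l with
  | nil => simp [weightedCats]
  | cons p rest ih =>
    obtain ⟨tok, n⟩ := p
    obtain ⟨cat, hcat⟩ := Option.isSome_iff_exists.mp (h (tok, n) (by simp))
    have := ih (fun x hx => h x (by simp [hx]))
    simp [weightedCats, hcat, this, catOf]

theorem weightedCats_failure (liwc_dict : List (String × List String)) (liwc_prefix : List (String × List (String × List String))) (l : List (String × Int))
    (h : ∃ p ∈ l, match_liwc p.1 liwc_dict liwc_prefix = none) :
    weightedCats liwc_dict liwc_prefix l = none := by
  induction l with
  | nil => simp at h
  | cons p rest ih =>
    obtain ⟨tok, n⟩ := p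
    obtain ⟨x, hx, hnone⟩ := h
    rcases List.mem_cons.mp hx with h1 | h1
    · subst h1; simp [weightedCats, hnone]
    · cases hm : match_liwc tok liwc_dict liwc_prefix with
      | none => simp [weightedCats, hm]
      | some cat => simp [weightedCats, hm, ih ⟨x, h1, hnone⟩]

-- the counting heart: summing each distinct element's multiplicity over a nodup index list
-- equals counting with multiplicity
theorem sum_count_filter (l : List String) (p : String → Bool) (u : List String)
    (hu : u.Nodup) (hmem : ∀ x ∈ l, x ∈ u) :
    (((u.filter p).map (fun k => (l.count k : Int))).sum) = (l.countP p : Int) := by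
  induction l with
  | nil => simp
  | cons a l' ih =>
    have hmem' : ∀ x ∈ l', x ∈ u := fun x hx => hmem x (by simp [hx])
    have hsplit : ((u.filter p).map (fun k => ((a :: l').count k : Int))).sum
        = ((u.filter p).map (fun k => (l'.count k : Int))).sum
          + ((u.filter p).map (fun k => (if a = k then (1 : Int) else 0))).sum := by
      rw [← List.sum_map_add]
      congr 1
      apply List.map_congr_left
      intro k _
      by_cases hk : a = k <;> simp [hk]
    rw [hsplit, ih hmem']
    have ha : a ∈ u := hmem a (by simp)
    have hfn : (fun k : String => if a = k then (1 : Int) else 0)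
        = fun k => if decide (a = k) = true then 1 else 0 := by
      funext k; simp
    have hone : ((u.filter p).map (fun k => (if a = k then (1 : Int) else 0))).sum
        = if p a then 1 else 0 := by
      rw [hfn, PySem.List.sum_map_ite_one_zero]
      have hcp : (u.filter p).countP (fun k => decide (a = k)) = (u.filter p).count a := by
        refine List.countP_congr (fun x _ => ?_)
        by_cases hxa : x = a
        · subst hxa; simp
        · simp [hxa, (Ne.symm hxa : a ≠ x)]
      rw [hcp]
      by_cases hp : p a
      · rw [List.count_filter hp]
        simp [hp, List.count_eq_one_of_mem hu ha]
      · have hnm : a ∉ u.filter p := by simp [List.mem_filter, hp]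
        simp [hp, List.count_eq_zero.mpr hnm]
    rw [hone]
    simp only [List.countP_cons]
    by_cases hp : p a
    · simp [hp]
    · simp [hp]

theorem totalB_eq_cnt (liwc_dict : List (String × List String)) (liwc_prefix : List (String × List (String × List String))) (c : String) (ts : List String) :
    totalB c ((PySem.Set.ofList ts).map (fun k => (catOf liwc_dict liwc_prefix k, (ts.count k : Int))))
      = cnt liwc_dict liwc_prefix c ts := by
  unfold totalB cnt
  rw [List.filter_map, List.map_map]
  exact sum_count_filter ts _ _ (PySem.Set.nodup_ofList ts)
    (fun x hx => (PySem.Set.mem_ofList ts x).mpr hx)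

-- ===== VERDICT (by name: the statement is the Claim_ definition above) =====
theorem polarity_spec : Claim_equal_polarity := by
  intro q_tokens liwc_dict liwc_prefix _ _
  unfold Spec_polarity polarity
  simp only [polarity_alt, PySem.Dict.foldl_insert_getD_add_one_eq_counter,
    PySem.Dict.items_counter]
  by_cases hall : ∀ t ∈ q_tokens, (match_liwc t liwc_dict liwc_prefix).isSome
  · have hB := weightedCats_success liwc_dict liwc_prefix
      ((PySem.Set.ofList q_tokens).map (fun k => (k, (q_tokens.count k : Int))))
      (by
        intro p hp
        obtain ⟨k, hk, rfl⟩ := List.mem_map.mp hp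
        exact hall k ((PySem.Set.mem_ofList q_tokens k).mp hk))
    rw [loopA_success liwc_dict liwc_prefix q_tokens hall, hB]
    simp only [Option.getD_some, List.map_map]
    have hmaps : ((PySem.Set.ofList q_tokens).map
          ((fun p => (catOf liwc_dict liwc_prefix p.1, p.2)) ∘ fun k => (k, (q_tokens.count k : Int))))
        = (PySem.Set.ofList q_tokens).map (fun k => (catOf liwc_dict liwc_prefix k, (q_tokens.count k : Int))) := by
      simp [Function.comp]
    rw [hmaps]
    simp only [totalB_eq_cnt]
    simp
  · rw [not_forall] at hall
    obtain ⟨t, ht'⟩ := hall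
    rw [Classical.not_imp] at ht'
    obtain ⟨ht, hnone⟩ := ht'
    have hnone' : match_liwc t liwc_dict liwc_prefix = none :=
      Option.not_isSome_iff_eq_none.mp hnone
    rw [loopA_failure liwc_dict liwc_prefix q_tokens ⟨t, ht, hnone'⟩,
        weightedCats_failure liwc_dict liwc_prefix _
          ⟨(t, (q_tokens.count t : Int)),
           List.mem_map.mpr ⟨t, (PySem.Set.mem_ofList q_tokens t).mpr ht, rfl⟩, hnone'⟩]
    rfl
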